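-- pv_equiv track=rewrite | github.com/Miyayx/device-mapping | find_shared_device.py | get_device_accounttype
-- ===== SOURCE A (Python) =====
-- def get_device_accounttype(behavior_count, account_type):
--     """
--     """
--     device_accounttype_num = {}
--     for b, c in behavior_count.items():
--         d, a = b
--         if not d in device_accounttype_num:
--             device_accounttype_num[d] = {}
--         t = account_type[a]
--         device_accounttype_num[d][t] = device_accounttype_num[d].get(t, 0) + 1
--
--     return device_accounttype_num
-- ===== SOURCE B (Python) =====
-- def get_device_accounttype(behavior_count, account_type):
--     # pass 1: flat counter keyed by (device, type), one count per behavior key (value ignored)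
--     flat = {}
--     for d, a in behavior_count:
--         key = (d, account_type[a])
--         flat[key] = flat.get(key, 0) + 1
--     # pass 2: reshape the flat table into device -> {type -> count}
--     nested = {}
--     for (d, t), n in flat.items():
--         if d not in nested:
--             nested[d] = {}
--         nested[d][t] = n
--     return nested
-- ===== Notes on version B (the rewrite author's own statement) =====
-- stated objective: alternative
-- what changed: A builds the nested device->type->count dict incrementally in one pass; B first builds a flat counter keyed by (device, type) in one pass and then reshapes that flat table into the nested dict in a second pass.
import Mathlib
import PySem

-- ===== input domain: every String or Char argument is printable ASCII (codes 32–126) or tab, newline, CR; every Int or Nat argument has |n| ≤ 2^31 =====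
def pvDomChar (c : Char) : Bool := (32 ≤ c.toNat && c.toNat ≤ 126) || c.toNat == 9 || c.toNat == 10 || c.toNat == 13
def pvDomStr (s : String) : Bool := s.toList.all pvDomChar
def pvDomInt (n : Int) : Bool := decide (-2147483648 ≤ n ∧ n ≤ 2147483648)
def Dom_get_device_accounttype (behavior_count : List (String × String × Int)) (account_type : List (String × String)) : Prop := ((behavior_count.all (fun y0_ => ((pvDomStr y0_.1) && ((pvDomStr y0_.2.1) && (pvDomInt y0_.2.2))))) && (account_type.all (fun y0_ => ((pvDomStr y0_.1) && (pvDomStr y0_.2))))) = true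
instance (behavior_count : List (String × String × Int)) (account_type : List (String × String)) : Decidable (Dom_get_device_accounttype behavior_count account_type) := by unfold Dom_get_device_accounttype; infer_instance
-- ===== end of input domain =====

-- B replaces A's single pass that grows the nested dict in place by two differently-shaped
-- passes — a flat counter keyed by (device, type) and a reshaping pass over its items
-- (objective: alternative decomposition, same asymptotic cost).

-- ===== PORT A =====
def get_device_accounttype (behavior_count : List (String × String × Int)) (account_type : List (String × String)) : List (String × List (String × Int)) :=
  -- the Python arguments are dicts; their assoc-list representations are read into PySem.Dicts
  let bc : PySem.Dict (String × String) Int :=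
    PySem.Dict.ofList (behavior_count.map (fun p => ((p.1, p.2.1), p.2.2)))
  let at_ : PySem.Dict String String := PySem.Dict.ofList account_type
  let num : PySem.Dict String (PySem.Dict String Int) :=
    bc.items.foldl (fun num p =>
      -- for b, c in behavior_count.items(): d, a = b   (c is never used)
      let d := p.1.1
      let a := p.1.2
      let num := if num.contains d then num else num.insert d PySem.Dict.empty  -- if not d in …: …[d] = {}
      let t := at_.getD a ""   -- account_type[a]; Pre_ guarantees a is a key (Python raises KeyError otherwise)
      let inner := num.getD d PySem.Dict.empty
      num.insert d (inner.insert t (inner.getD t 0 + 1))) PySem.Dict.empty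
  num.items.map (fun q => (q.1, q.2.items))

-- ===== PORT B =====
def get_device_accounttype_alt (behavior_count : List (String × String × Int)) (account_type : List (String × String)) : List (String × List (String × Int)) :=
  let bc : PySem.Dict (String × String) Int :=
    PySem.Dict.ofList (behavior_count.map (fun p => ((p.1, p.2.1), p.2.2)))
  let at_ : PySem.Dict String String := PySem.Dict.ofList account_type
  -- pass 1: flat counter keyed by (device, type)
  let flat : PySem.Dict (String × String) Int :=
    bc.keys.foldl (fun f q =>
      let key := (q.1, at_.getD q.2 "")   -- account_type[a]; Pre_ guarantees presence
      f.insert key (f.getD key 0 + 1)) PySem.Dict.empty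
  -- pass 2: reshape the flat table into device -> {type -> count}
  let nested : PySem.Dict String (PySem.Dict String Int) :=
    flat.items.foldl (fun nd e =>
      let nd := if nd.contains e.1.1 then nd else nd.insert e.1.1 PySem.Dict.empty
      nd.insert e.1.1 ((nd.getD e.1.1 PySem.Dict.empty).insert e.1.2 e.2)) PySem.Dict.empty
  nested.items.map (fun q => (q.1, q.2.items))

-- ===== PRECONDITION & SPEC =====
-- Pre_ excludes exactly the inputs on which Python A raises KeyError: a behavior key whose
-- account id is not a key of account_type.
def Pre_get_device_accounttype (behavior_count : List (String × String × Int)) (account_type : List (String × String)) : Prop :=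
  (behavior_count.all (fun p => account_type.any (fun q => q.1 == p.2.1))) = true
instance (behavior_count : List (String × String × Int)) (account_type : List (String × String)) : Decidable (Pre_get_device_accounttype behavior_count account_type) := by unfold Pre_get_device_accounttype; infer_instance
def pvWitness_get_device_accounttype : (List (String × String × Int)) × (List (String × String)) :=
  ([("d1", "a1", 3), ("d1", "a2", 1), ("d2", "a1", 2)], [("a1", "mail"), ("a2", "web")])

def Spec_get_device_accounttype (behavior_count : List (String × String × Int)) (account_type : List (String × String)) (out : List (String × List (String × Int))) : Prop := out = get_device_accounttype_alt behavior_count account_type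
instance (behavior_count : List (String × String × Int)) (account_type : List (String × String)) (out : List (String × List (String × Int))) : Decidable (Spec_get_device_accounttype behavior_count account_type out) := by unfold Spec_get_device_accounttype; infer_instance

-- ===== CLAIM (what is proved, stated in full; the proofs are below) =====
def Claim_equal_get_device_accounttype : Prop := ∀ (behavior_count : List (String × String × Int)) (account_type : List (String × String)), Dom_get_device_accounttype behavior_count account_type → Pre_get_device_accounttype behavior_count account_type → Spec_get_device_accounttype behavior_count account_type (get_device_accounttype behavior_count account_type)

-- ===== LEMMAS AND PROOFS =====

lemma pv_add_of_mem {α : Type} [BEq α] [LawfulBEq α] {s : PySem.Set α} {x : α} (h : x ∈ s) :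
    PySem.Set.add s x = s := by simp [PySem.Set.add, PySem.Set.contains, h]
lemma pv_add_of_not_mem {α : Type} [BEq α] [LawfulBEq α] {s : PySem.Set α} {x : α} (h : x ∉ s) :
    PySem.Set.add s x = s ++ [x] := by simp [PySem.Set.add, PySem.Set.contains, h]
lemma pv_ofList_append {α : Type} [BEq α] (xs : List α) (y : α) :
    PySem.Set.ofList (xs ++ [y]) = PySem.Set.add (PySem.Set.ofList xs) y := by
  rw [PySem.Set.ofList_eq_foldl, PySem.Set.ofList_eq_foldl, List.foldl_append]; rfl

lemma pv_ofList_map_inj {α β : Type} [BEq α] [LawfulBEq α] [BEq β] [LawfulBEq β]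
    (xs : List α) (f : α → β) (hinj : ∀ a ∈ xs, ∀ b ∈ xs, f a = f b → a = b) :
    PySem.Set.ofList (xs.map f) = (PySem.Set.ofList xs).map f := by
  induction xs using List.reverseRecOn with
  | nil => rfl
  | append_singleton xs y ih =>
    have hinj' : ∀ a ∈ xs, ∀ b ∈ xs, f a = f b → a = b := fun a ha b hb =>
      hinj a (by simp [ha]) b (by simp [hb])
    rw [List.map_append, List.map_singleton, pv_ofList_append, pv_ofList_append,
      ih hinj']
    by_cases hy : y ∈ PySem.Set.ofList xs
    · have hfy : f y ∈ (PySem.Set.ofList xs).map f := List.mem_map_of_mem hy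
      rw [pv_add_of_mem hy, pv_add_of_mem hfy]
    · have hfy : f y ∉ (PySem.Set.ofList xs).map f := by
        intro hmem
        obtain ⟨a, ha, hfa⟩ := List.mem_map.mp hmem
        have ha' : a ∈ xs := (PySem.Set.mem_ofList xs a).mp ha
        exact hy ((hinj a (by simp [ha']) y (by simp) hfa) ▸ ha)
      rw [pv_add_of_not_mem hy, pv_add_of_not_mem hfy, List.map_append, List.map_singleton]

lemma pv_ofList_filter {α : Type} [BEq α] [LawfulBEq α] (xs : List α) (q : α → Bool) :
    PySem.Set.ofList (xs.filter q) = (PySem.Set.ofList xs).filter q := by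
  induction xs using List.reverseRecOn with
  | nil => rfl
  | append_singleton xs y ih =>
    rw [pv_ofList_append]
    cases hq : q y
    · by_cases hy : y ∈ PySem.Set.ofList xs
      · rw [pv_add_of_mem hy]
        simpa [List.filter_append, hq] using ih
      · rw [pv_add_of_not_mem hy]
        simpa [List.filter_append, hq] using ih
    · have h1 : List.filter q (xs ++ [y]) = List.filter q xs ++ [y] := by
        simp [List.filter_append, hq]
      rw [h1, pv_ofList_append]
      by_cases hy : y ∈ PySem.Set.ofList xs
      · have hmem : y ∈ PySem.Set.ofList (xs.filter q) := by
          rw [PySem.Set.mem_ofList]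
          exact List.mem_filter.mpr ⟨(PySem.Set.mem_ofList xs y).mp hy, hq⟩
        rw [pv_add_of_mem hy, pv_add_of_mem hmem, ih]
      · have hy' : y ∉ PySem.Set.ofList (xs.filter q) := by
          rw [PySem.Set.mem_ofList]
          intro hmem
          exact hy ((PySem.Set.mem_ofList xs y).mpr (List.mem_filter.mp hmem).1)
        rw [pv_add_of_not_mem hy, pv_add_of_not_mem hy', ih]
        simp [List.filter_append, hq]

lemma pv_ofList_map_ofList {α β : Type} [BEq α] [LawfulBEq α] [BEq β] [LawfulBEq β]
    (xs : List α) (f : α → β) :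
    PySem.Set.ofList ((PySem.Set.ofList xs).map f) = PySem.Set.ofList (xs.map f) := by
  induction xs using List.reverseRecOn with
  | nil => rfl
  | append_singleton xs y ih =>
    rw [pv_ofList_append, List.map_append, List.map_singleton, pv_ofList_append]
    by_cases hy : y ∈ PySem.Set.ofList xs
    · have hfy : f y ∈ PySem.Set.ofList (xs.map f) := by
        rw [PySem.Set.mem_ofList]
        exact List.mem_map_of_mem ((PySem.Set.mem_ofList xs y).mp hy)
      rw [pv_add_of_mem hy, pv_add_of_mem hfy, ih]
    · rw [pv_add_of_not_mem hy, List.map_append, List.map_singleton, pv_ofList_append, ih]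

def pvStepA (num : PySem.Dict String (PySem.Dict String Int)) (x : String × String) : PySem.Dict String (PySem.Dict String Int) :=
  let num1 := if num.contains x.1 then num else num.insert x.1 PySem.Dict.empty
  let inner := num1.getD x.1 PySem.Dict.empty
  num1.insert x.1 (inner.insert x.2 (inner.getD x.2 0 + 1))

def pvInnerItems (m : List (String × String)) (d : String) : List (String × Int) :=
  (PySem.Set.ofList ((m.filter (fun p => p.1 == d)).map Prod.snd)).map (fun t => (t, (m.count (d, t) : Int)))

def pvCanon (m : List (String × String)) : PySem.Dict String (PySem.Dict String Int) :=
  PySem.Dict.mk ((PySem.Set.ofList (m.map Prod.fst)).map (fun d => (d, PySem.Dict.mk (pvInnerItems m d))))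

lemma pv_canon_keys (m : List (String × String)) :
    (pvCanon m).keys = PySem.Set.ofList (m.map Prod.fst) := by
  simp [pvCanon, PySem.Dict.keys_mk, List.map_map, Function.comp_def]

lemma pv_canon_contains (m : List (String × String)) (d : String) :
    (pvCanon m).contains d = true ↔ d ∈ m.map Prod.fst := by
  rw [PySem.Dict.contains_iff_mem_keys, pv_canon_keys, PySem.Set.mem_ofList]

lemma pv_canon_getD (m : List (String × String)) (d : String) (hd : d ∈ m.map Prod.fst) :
    (pvCanon m).getD d PySem.Dict.empty = PySem.Dict.mk (pvInnerItems m d) := by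
  apply PySem.Dict.getD_of_mem_items
  · show (d, PySem.Dict.mk (pvInnerItems m d)) ∈ (PySem.Set.ofList (m.map Prod.fst)).map _
    exact List.mem_map_of_mem ((PySem.Set.mem_ofList _ _).mpr hd)
  · rw [pv_canon_keys]; exact PySem.Set.nodup_ofList _

lemma pv_inner_keys (m : List (String × String)) (d : String) :
    (PySem.Dict.mk (pvInnerItems m d)).keys
      = PySem.Set.ofList ((m.filter (fun p => p.1 == d)).map Prod.snd) := by
  simp [pvInnerItems, PySem.Dict.keys_mk, List.map_map, Function.comp_def]

lemma pv_inner_getD (m : List (String × String)) (d t : String) :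
    (PySem.Dict.mk (pvInnerItems m d)).getD t 0 = (m.count (d, t) : Int) := by
  by_cases ht : t ∈ PySem.Set.ofList ((m.filter (fun p => p.1 == d)).map Prod.snd)
  · apply PySem.Dict.getD_of_mem_items
    · exact List.mem_map_of_mem ht
    · rw [pv_inner_keys]; exact PySem.Set.nodup_ofList _
  · have hc : (PySem.Dict.mk (pvInnerItems m d)).contains t = false := by
      cases hc : (PySem.Dict.mk (pvInnerItems m d)).contains t
      · rfl
      · exact absurd (by rwa [PySem.Dict.contains_iff_mem_keys, pv_inner_keys] at hc) ht
    rw [PySem.Dict.getD_of_not_contains _ _ hc]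
    have : (d, t) ∉ m := by
      intro hm
      exact ht ((PySem.Set.mem_ofList _ _).mpr
        (List.mem_map_of_mem (List.mem_filter.mpr ⟨hm, by simp⟩)))
    simp [List.count_eq_zero.mpr this]

lemma pv_innerItems_ne (m : List (String × String)) (x : String × String) (d : String)
    (hne : d ≠ x.1) : pvInnerItems (m ++ [x]) d = pvInnerItems m d := by
  have hf : List.filter (fun p => p.1 == d) (m ++ [x]) = List.filter (fun p => p.1 == d) m := by
    rw [List.filter_append]
    simp [(beq_iff_eq).ne.mpr (Ne.symm hne)]
  unfold pvInnerItems
  rw [hf]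
  apply List.map_congr_left
  intro t _
  have : (d, t) ≠ x := by intro h; exact hne (by rw [← h])
  simp [List.count_append, Ne.symm this]

lemma pv_inner_insert (m : List (String × String)) (d0 t0 : String) :
    (PySem.Dict.mk (pvInnerItems m d0)).insert t0 ((m.count (d0, t0) : Int) + 1)
      = PySem.Dict.mk (pvInnerItems (m ++ [(d0, t0)]) d0) := by
  have hfilt : List.filter (fun p => p.1 == d0) (m ++ [(d0, t0)])
      = List.filter (fun p => p.1 == d0) m ++ [(d0, t0)] := by
    simp [List.filter_append]
  have hT : PySem.Set.ofList ((List.filter (fun p => p.1 == d0) (m ++ [(d0, t0)])).map Prod.snd)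
      = PySem.Set.add (PySem.Set.ofList ((List.filter (fun p => p.1 == d0) m).map Prod.snd)) t0 := by
    rw [hfilt, List.map_append, List.map_singleton, pv_ofList_append]
  by_cases ht : t0 ∈ PySem.Set.ofList ((List.filter (fun p => p.1 == d0) m).map Prod.snd)
  · have hc : (PySem.Dict.mk (pvInnerItems m d0)).contains t0 = true := by
      rw [PySem.Dict.contains_iff_mem_keys, pv_inner_keys]; exact ht
    apply PySem.Dict.ext
    rw [PySem.Dict.items_insert_of_contains _ _ hc]
    show _ = pvInnerItems (m ++ [(d0, t0)]) d0
    unfold pvInnerItems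
    rw [hT, pv_add_of_mem ht, List.map_map]
    apply List.map_congr_left
    intro t htT
    by_cases htt : t = t0
    · subst htt
      simp [List.count_append]
    · have : (t == t0) = false := by simp [htt]
      have hcnt : List.count (d0, t) (m ++ [(d0, t0)]) = List.count (d0, t) m := by
        have : ((d0, t0) : String × String) ≠ (d0, t) := by
          intro h; exact htt (congrArg Prod.snd h).symm
        simp [List.count_append, this]
      simp [hcnt, htt]
  · have hc : (PySem.Dict.mk (pvInnerItems m d0)).contains t0 = false := by
      cases hc : (PySem.Dict.mk (pvInnerItems m d0)).contains t0
      · rfl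
      · exact absurd (by rwa [PySem.Dict.contains_iff_mem_keys, pv_inner_keys] at hc) ht
    have hcnt0 : List.count ((d0, t0) : String × String) m = 0 := by
      rw [List.count_eq_zero]
      intro hm
      exact ht ((PySem.Set.mem_ofList _ _).mpr
        (List.mem_map_of_mem (List.mem_filter.mpr ⟨hm, by simp⟩)))
    apply PySem.Dict.ext
    rw [PySem.Dict.items_insert_of_not_contains _ _ hc]
    show pvInnerItems m d0 ++ _ = pvInnerItems (m ++ [(d0, t0)]) d0
    unfold pvInnerItems
    rw [hT, pv_add_of_not_mem ht, List.map_append, List.map_singleton]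
    congr 1
    · apply List.map_congr_left
      intro t htT
      have htt : t ≠ t0 := fun h => ht (h ▸ htT)
      have : ((d0, t0) : String × String) ≠ (d0, t) := by
        intro h; exact htt (congrArg Prod.snd h).symm
      simp [List.count_append, this]
    · simp [List.count_append, hcnt0]

lemma pv_build_eq_canon (m : List (String × String)) :
    m.foldl pvStepA PySem.Dict.empty = pvCanon m := by
  induction m using List.reverseRecOn with
  | nil => rfl
  | append_singleton m x ih =>
    obtain ⟨d0, t0⟩ := x
    rw [List.foldl_append, ih]
    show pvStepA (pvCanon m) (d0, t0) = pvCanon (m ++ [(d0, t0)])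
    by_cases hd0 : d0 ∈ m.map Prod.fst
    · have hc : (pvCanon m).contains d0 = true := (pv_canon_contains _ _).mpr hd0
      have step : pvStepA (pvCanon m) (d0, t0)
          = (pvCanon m).insert d0 (PySem.Dict.mk (pvInnerItems (m ++ [(d0, t0)]) d0)) := by
        simp only [pvStepA, hc, if_true]
        rw [pv_canon_getD m d0 hd0, pv_inner_getD, pv_inner_insert]
      rw [step]
      have hS : PySem.Set.ofList ((m ++ [(d0, t0)]).map Prod.fst)
          = PySem.Set.ofList (m.map Prod.fst) := by
        rw [List.map_append, List.map_singleton, pv_ofList_append]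
        exact pv_add_of_mem ((PySem.Set.mem_ofList _ _).mpr hd0)
      apply PySem.Dict.ext
      rw [PySem.Dict.items_insert_of_contains _ _ hc]
      show _ = (PySem.Set.ofList ((m ++ [(d0, t0)]).map Prod.fst)).map _
      rw [hS]
      show (List.map _ (PySem.Set.ofList (m.map Prod.fst))).map _ = _
      rw [List.map_map]
      apply List.map_congr_left
      intro d hdS
      by_cases hdd : d = d0
      · subst hdd
        simp
      · have hb : (d == d0) = false := by simp [hdd]
        have : pvInnerItems (m ++ [(d0, t0)]) d = pvInnerItems m d :=
          pv_innerItems_ne m (d0, t0) d hdd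
        simp [this, hdd]
    · have hc : (pvCanon m).contains d0 = false := by
        cases hc : (pvCanon m).contains d0
        · rfl
        · exact absurd ((pv_canon_contains _ _).mp hc) hd0
      have hd0S : d0 ∉ PySem.Set.ofList (m.map Prod.fst) := by
        rw [PySem.Set.mem_ofList]; exact hd0
      have hfilt : List.filter (fun p => p.1 == d0) m = [] := by
        rw [List.filter_eq_nil_iff]
        intro p hp
        simp only [beq_iff_eq]
        intro h
        exact hd0 (h ▸ List.mem_map_of_mem hp)
      have hcnt0 : List.count ((d0, t0) : String × String) m = 0 := by
        rw [List.count_eq_zero]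
        intro hm
        exact hd0 (List.mem_map_of_mem hm)
      have hInner : pvInnerItems (m ++ [(d0, t0)]) d0 = [(t0, 1)] := by
        unfold pvInnerItems
        rw [List.filter_append, hfilt]
        simp [List.count_append, hcnt0, PySem.Set.ofList_eq_foldl, PySem.Set.add, PySem.Set.contains]
      -- step with fresh device
      have hc2 : ((pvCanon m).insert d0 PySem.Dict.empty).contains d0 = true :=
        PySem.Dict.contains_insert_self _ _ _
      have step : pvStepA (pvCanon m) (d0, t0)
          = ((pvCanon m).insert d0 PySem.Dict.empty).insert d0
              (PySem.Dict.mk [(t0, 1)]) := by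
        simp only [pvStepA, hc, Bool.false_eq_true, if_false]
        rw [PySem.Dict.getD_insert_self]
        congr 1
      rw [step]
      apply PySem.Dict.ext
      rw [PySem.Dict.items_insert_of_contains _ _ hc2,
        PySem.Dict.items_insert_of_not_contains _ _ hc]
      have hS : PySem.Set.ofList ((m ++ [(d0, t0)]).map Prod.fst)
          = PySem.Set.ofList (m.map Prod.fst) ++ [d0] := by
        rw [List.map_append, List.map_singleton, pv_ofList_append]
        exact pv_add_of_not_mem hd0S
      show _ = (PySem.Set.ofList ((m ++ [(d0, t0)]).map Prod.fst)).map _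
      rw [hS, List.map_append, List.map_append, List.map_singleton, List.map_singleton]
      congr 1
      · show (List.map _ (PySem.Set.ofList (m.map Prod.fst))).map _ = _
        rw [List.map_map]
        apply List.map_congr_left
        intro d hdS
        have hdd : d ≠ d0 := fun h => hd0S (h ▸ hdS)
        have hb : (d == d0) = false := by simp [hdd]
        have : pvInnerItems (m ++ [(d0, t0)]) d = pvInnerItems m d :=
          pv_innerItems_ne m (d0, t0) d hdd
        simp [this, hdd]
      · simp [hInner]

def pvStepR (nd : PySem.Dict String (PySem.Dict String Int)) (e : (String × String) × Int) : PySem.Dict String (PySem.Dict String Int) :=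
  let nd1 := if nd.contains e.1.1 then nd else nd.insert e.1.1 PySem.Dict.empty
  nd1.insert e.1.1 ((nd1.getD e.1.1 PySem.Dict.empty).insert e.1.2 e.2)

def pvGroup (l : List ((String × String) × Int)) (d : String) : List (String × Int) :=
  (l.filter (fun p => p.1.1 == d)).map (fun p => (p.1.2, p.2))

def pvReshaped (l : List ((String × String) × Int)) : PySem.Dict String (PySem.Dict String Int) :=
  PySem.Dict.mk ((PySem.Set.ofList (l.map (fun p => p.1.1))).map (fun d => (d, PySem.Dict.mk (pvGroup l d))))

lemma pv_rkeys (l : List ((String × String) × Int)) :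
    (pvReshaped l).keys = PySem.Set.ofList (l.map (fun p => p.1.1)) := by
  simp [pvReshaped, PySem.Dict.keys_mk, List.map_map, Function.comp_def]

lemma pv_rcontains (l : List ((String × String) × Int)) (d : String) :
    (pvReshaped l).contains d = true ↔ d ∈ l.map (fun p => p.1.1) := by
  rw [PySem.Dict.contains_iff_mem_keys, pv_rkeys, PySem.Set.mem_ofList]

lemma pv_rgetD (l : List ((String × String) × Int)) (d : String) (hd : d ∈ l.map (fun p => p.1.1)) :
    (pvReshaped l).getD d PySem.Dict.empty = PySem.Dict.mk (pvGroup l d) := by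
  apply PySem.Dict.getD_of_mem_items
  · show (d, PySem.Dict.mk (pvGroup l d)) ∈ (PySem.Set.ofList (l.map (fun p => p.1.1))).map _
    exact List.mem_map_of_mem ((PySem.Set.mem_ofList _ _).mpr hd)
  · rw [pv_rkeys]; exact PySem.Set.nodup_ofList _

lemma pv_group_ne (l : List ((String × String) × Int)) (e : (String × String) × Int) (d : String)
    (hne : d ≠ e.1.1) : pvGroup (l ++ [e]) d = pvGroup l d := by
  unfold pvGroup
  rw [List.filter_append]
  simp [(beq_iff_eq).ne.mpr (Ne.symm hne)]

lemma pv_reshape_eq (l : List ((String × String) × Int)) (hnd : (l.map Prod.fst).Nodup) :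
    l.foldl pvStepR PySem.Dict.empty = pvReshaped l := by
  induction l using List.reverseRecOn with
  | nil => rfl
  | append_singleton l e ih =>
    rw [List.map_append, List.map_singleton] at hnd
    have hnd' : (l.map Prod.fst).Nodup := (List.nodup_append.mp hnd).1
    have hfresh : e.1 ∉ l.map Prod.fst := by
      intro hmem
      have hdisj := List.disjoint_of_nodup_append hnd
      exact hdisj hmem (List.mem_singleton_self _)
    obtain ⟨⟨d0, t0⟩, n⟩ := e
    rw [List.foldl_append, ih hnd']
    show pvStepR (pvReshaped l) ((d0, t0), n) = _
    have hG : pvGroup (l ++ [((d0, t0), n)]) d0 = pvGroup l d0 ++ [(t0, n)] := by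
      unfold pvGroup
      rw [List.filter_append]
      simp
    by_cases hd0 : d0 ∈ l.map (fun p => p.1.1)
    · have hc : (pvReshaped l).contains d0 = true := (pv_rcontains _ _).mpr hd0
      have hinner_c : (PySem.Dict.mk (pvGroup l d0)).contains t0 = false := by
        cases hic : (PySem.Dict.mk (pvGroup l d0)).contains t0
        · rfl
        · exfalso
          rw [PySem.Dict.contains_iff_mem_keys, PySem.Dict.keys_mk] at hic
          simp only [pvGroup, List.map_map] at hic
          obtain ⟨p, hp, hpt⟩ := List.mem_map.mp hic
          have hpd : p.1.1 = d0 := by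
            have := (List.mem_filter.mp hp).2
            simpa using this
          have hpt' : p.1.2 = t0 := hpt
          apply hfresh
          show ((d0, t0) : String × String) ∈ _
          have : p.1 = (d0, t0) := Prod.ext hpd hpt'
          exact this ▸ List.mem_map_of_mem (List.mem_filter.mp hp).1
      have step : pvStepR (pvReshaped l) ((d0, t0), n)
          = (pvReshaped l).insert d0 (PySem.Dict.mk (pvGroup (l ++ [((d0, t0), n)]) d0)) := by
        simp only [pvStepR, hc, if_true]
        rw [pv_rgetD l d0 hd0]
        congr 1
        apply PySem.Dict.ext
        rw [PySem.Dict.items_insert_of_not_contains _ _ hinner_c]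
        rw [hG]
      rw [step]
      apply PySem.Dict.ext
      rw [PySem.Dict.items_insert_of_contains _ _ hc]
      have hS : PySem.Set.ofList ((l ++ [((d0, t0), n)]).map (fun p => p.1.1))
          = PySem.Set.ofList (l.map (fun p => p.1.1)) := by
        rw [List.map_append, List.map_singleton, pv_ofList_append]
        exact pv_add_of_mem ((PySem.Set.mem_ofList _ _).mpr hd0)
      show _ = (PySem.Set.ofList ((l ++ [((d0, t0), n)]).map (fun p => p.1.1))).map _
      rw [hS]
      show (List.map _ (PySem.Set.ofList (l.map (fun p => p.1.1)))).map _ = _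
      rw [List.map_map]
      apply List.map_congr_left
      intro d hdS
      by_cases hdd : d = d0
      · subst hdd
        simp
      · have : pvGroup (l ++ [((d0, t0), n)]) d = pvGroup l d :=
          pv_group_ne l ((d0, t0), n) d hdd
        simp [this, hdd]
    · have hc : (pvReshaped l).contains d0 = false := by
        cases hc : (pvReshaped l).contains d0
        · rfl
        · exact absurd ((pv_rcontains _ _).mp hc) hd0
      have hd0S : d0 ∉ PySem.Set.ofList (l.map (fun p => p.1.1)) := by
        rw [PySem.Set.mem_ofList]; exact hd0
      have hfilt : List.filter (fun p => p.1.1 == d0) l = [] := by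
        rw [List.filter_eq_nil_iff]
        intro p hp
        simp only [beq_iff_eq]
        intro h
        exact hd0 (h ▸ List.mem_map_of_mem hp)
      have hGnil : pvGroup l d0 = [] := by simp [pvGroup, hfilt]
      have hG' : pvGroup (l ++ [((d0, t0), n)]) d0 = [(t0, n)] := by
        rw [hG, hGnil]; rfl
      have hc2 : ((pvReshaped l).insert d0 PySem.Dict.empty).contains d0 = true :=
        PySem.Dict.contains_insert_self _ _ _
      have step : pvStepR (pvReshaped l) ((d0, t0), n)
          = ((pvReshaped l).insert d0 PySem.Dict.empty).insert d0
              (PySem.Dict.mk [(t0, n)]) := by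
        simp only [pvStepR, hc, Bool.false_eq_true, if_false]
        rw [PySem.Dict.getD_insert_self]
        congr 1
      rw [step]
      apply PySem.Dict.ext
      rw [PySem.Dict.items_insert_of_contains _ _ hc2,
        PySem.Dict.items_insert_of_not_contains _ _ hc]
      have hS : PySem.Set.ofList ((l ++ [((d0, t0), n)]).map (fun p => p.1.1))
          = PySem.Set.ofList (l.map (fun p => p.1.1)) ++ [d0] := by
        rw [List.map_append, List.map_singleton, pv_ofList_append]
        exact pv_add_of_not_mem hd0S
      show _ = (PySem.Set.ofList ((l ++ [((d0, t0), n)]).map (fun p => p.1.1))).map _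
      rw [hS, List.map_append, List.map_append, List.map_singleton, List.map_singleton]
      congr 1
      · show (List.map _ (PySem.Set.ofList (l.map (fun p => p.1.1)))).map _ = _
        rw [List.map_map]
        apply List.map_congr_left
        intro d hdS
        have hdd : d ≠ d0 := fun h => hd0S (h ▸ hdS)
        have : pvGroup (l ++ [((d0, t0), n)]) d = pvGroup l d :=
          pv_group_ne l ((d0, t0), n) d hdd
        simp [this, hdd]
      · simp [hG']

lemma pv_reshape_counter (m : List (String × String)) :
    (PySem.Dict.counter m).items.foldl pvStepR PySem.Dict.empty = pvCanon m := by
  rw [PySem.Dict.items_counter]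
  have hnd : (((PySem.Set.ofList m).map (fun k => (k, (m.count k : Int)))).map Prod.fst).Nodup := by
    rw [List.map_map]
    exact (List.nodup_map_iff_inj_on (PySem.Set.nodup_ofList m)).mpr (fun a _ b _ h => h)
  rw [pv_reshape_eq _ hnd]
  unfold pvReshaped pvCanon
  have houter : ((PySem.Set.ofList m).map (fun k => (k, (m.count k : Int)))).map (fun p => p.1.1)
      = (PySem.Set.ofList m).map Prod.fst := by
    rw [List.map_map]; rfl
  rw [houter, pv_ofList_map_ofList]
  congr 1
  apply List.map_congr_left
  intro d hd
  congr 1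
  apply PySem.Dict.ext
  show pvGroup _ d = pvInnerItems m d
  unfold pvGroup pvInnerItems
  rw [List.filter_map, List.map_map]
  have hinj : ∀ a ∈ m.filter (fun p => p.1 == d), ∀ b ∈ m.filter (fun p => p.1 == d),
      Prod.snd a = Prod.snd b → a = b := by
    intro a ha b hb hab
    have ha1 : a.1 = d := by simpa using (List.mem_filter.mp ha).2
    have hb1 : b.1 = d := by simpa using (List.mem_filter.mp hb).2
    exact Prod.ext (ha1.trans hb1.symm) hab
  rw [pv_ofList_map_inj _ _ hinj, pv_ofList_filter, List.map_map]
  apply List.map_congr_left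
  intro k hk
  have hk1 : k.1 = d := by
    have := (List.mem_filter.mp hk).2
    simpa using this
  simp [← hk1]

lemma pv_main (bcD : PySem.Dict (String × String) Int) (atD : PySem.Dict String String) :
    bcD.items.foldl (fun (num : PySem.Dict String (PySem.Dict String Int)) p =>
        let d := p.1.1
        let a := p.1.2
        let num := if num.contains d then num else num.insert d PySem.Dict.empty
        let t := atD.getD a ""
        let inner := num.getD d PySem.Dict.empty
        num.insert d (inner.insert t (inner.getD t 0 + 1))) PySem.Dict.empty
    = ((bcD.keys.foldl (fun (f : PySem.Dict (String × String) Int) q =>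
          let key := (q.1, atD.getD q.2 "")
          f.insert key (f.getD key 0 + 1)) PySem.Dict.empty).items).foldl (fun (nd : PySem.Dict String (PySem.Dict String Int)) e =>
        let nd := if nd.contains e.1.1 then nd else nd.insert e.1.1 PySem.Dict.empty
        nd.insert e.1.1 ((nd.getD e.1.1 PySem.Dict.empty).insert e.1.2 e.2)) PySem.Dict.empty := by
  have hA : bcD.items.foldl (fun (num : PySem.Dict String (PySem.Dict String Int)) p =>
        let d := p.1.1
        let a := p.1.2
        let num := if num.contains d then num else num.insert d PySem.Dict.empty
        let t := atD.getD a ""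
        let inner := num.getD d PySem.Dict.empty
        num.insert d (inner.insert t (inner.getD t 0 + 1))) PySem.Dict.empty
      = (bcD.items.map (fun p => (p.1.1, atD.getD p.1.2 ""))).foldl pvStepA PySem.Dict.empty := by
    rw [List.foldl_map]
    rfl
  have hflat : bcD.keys.foldl (fun (f : PySem.Dict (String × String) Int) q =>
        let key := (q.1, atD.getD q.2 "")
        f.insert key (f.getD key 0 + 1)) PySem.Dict.empty
      = PySem.Dict.counter (bcD.items.map (fun p => (p.1.1, atD.getD p.1.2 ""))) := by
    rw [← PySem.Dict.foldl_insert_getD_add_one_eq_counter]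
    have : bcD.items.map (fun p => (p.1.1, atD.getD p.1.2 ""))
        = bcD.keys.map (fun q => (q.1, atD.getD q.2 "")) := by
      show _ = (bcD.items.map Prod.fst).map _
      rw [List.map_map]
      rfl
    rw [this, List.foldl_map]
  refine hA.trans ?_
  rw [hflat, pv_build_eq_canon]
  exact (pv_reshape_counter _).symm

-- ===== VERDICT (by name: the statement is the Claim_ definition above) =====
theorem get_device_accounttype_spec : Claim_equal_get_device_accounttype := by
  intro behavior_count account_type _hdom _hpre
  unfold Spec_get_device_accounttype get_device_accounttype get_device_accounttype_alt
  exact congrArg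
    (fun dct : PySem.Dict String (PySem.Dict String Int) =>
      dct.items.map (fun q => (q.1, q.2.items)))
    (pv_main (PySem.Dict.ofList (behavior_count.map (fun p => ((p.1, p.2.1), p.2.2))))
      (PySem.Dict.ofList account_type))
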